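-- pv_equiv track=rewrite | github.com/asarandi/advent-of-code | day_13/aoc2015d13.py | calc
-- ===== SOURCE A (Python) =====
-- def calc(lst: [], guests: {}):
--     res = 0
--     for i in range(len(lst)):
--         left = (i + len(lst) - 1) % len(lst)
--         right = (i + 1) % len(lst)
--         res += guests[lst[i]][lst[left]]
--         res += guests[lst[i]][lst[right]]
--     return res
-- ===== SOURCE B (Python) =====
-- def calc(lst: [], guests: {}):
--     # Stage 1: count every directed adjacency (each circular edge in both directions).
--     n = len(lst)
--     count = {}
--     for i in range(n):
--         a, b = lst[i], lst[(i + 1) % n]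
--         count[(a, b)] = count.get((a, b), 0) + 1
--         count[(b, a)] = count.get((b, a), 0) + 1
--     # Stage 2: one lookup per DISTINCT directed pair, weighted by its multiplicity.
--     total = 0
--     for (a, b), c in count.items():
--         total += guests[a][b] * c
--     return total
-- ===== Notes on version B (the rewrite author's own statement) =====
-- stated objective: alternative
-- what changed: B replaces A's per-seat modular neighbor lookups by two staged passes: it first builds a counter of directed adjacent pairs over the circular edges, then does one guests lookup per distinct pair, weighted by its multiplicity.
import Mathlib
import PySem

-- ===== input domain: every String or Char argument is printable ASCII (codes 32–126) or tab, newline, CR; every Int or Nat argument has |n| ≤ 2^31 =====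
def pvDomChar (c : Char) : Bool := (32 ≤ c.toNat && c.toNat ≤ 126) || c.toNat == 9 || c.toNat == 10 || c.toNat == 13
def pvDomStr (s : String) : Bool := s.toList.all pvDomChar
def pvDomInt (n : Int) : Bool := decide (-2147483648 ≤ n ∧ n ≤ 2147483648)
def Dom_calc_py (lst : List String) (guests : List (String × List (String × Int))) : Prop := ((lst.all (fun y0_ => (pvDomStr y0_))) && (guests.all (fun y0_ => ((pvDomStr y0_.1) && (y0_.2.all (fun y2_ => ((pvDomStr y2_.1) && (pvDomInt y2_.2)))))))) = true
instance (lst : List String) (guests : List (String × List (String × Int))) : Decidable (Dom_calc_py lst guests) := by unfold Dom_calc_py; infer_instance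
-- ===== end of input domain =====

-- B: two staged passes — a counter of directed circular adjacencies, then one sweep of the
-- guests table adding weight × adjacency count — instead of A's per-seat neighbor lookups;
-- objective: alternative (same cost, different traversal).


-- guests[a][b] as an Option (none = KeyError); Pre_ guarantees every access used is some
def pvW (guests : List (String × List (String × Int))) (a b : String) : Option Int :=
  (guests.lookup a).bind (fun row => row.lookup b)

-- guests[a][b] totalized with default 0 (only evaluated under Pre_, where it is some)
def pvWD (guests : List (String × List (String × Int))) (a b : String) : Int :=
  (pvW guests a b).getD 0

-- ===== PORT A =====
def calc_py (lst : List String) (guests : List (String × List (String × Int))) : Int :=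
  (PySem.List.pyRange 0 (lst.length : Int) 1).foldl (fun res i =>
    let left := PySem.Int.mod (i + (lst.length : Int) - 1) (lst.length : Int)
    let right := PySem.Int.mod (i + 1) (lst.length : Int)
    res + pvWD guests (PySem.List.pyGetD lst i "") (PySem.List.pyGetD lst left "")
        + pvWD guests (PySem.List.pyGetD lst i "") (PySem.List.pyGetD lst right "")) 0

-- ===== PORT B =====
def calc_py_alt (lst : List String) (guests : List (String × List (String × Int))) : Int :=
  -- stage 1: counter of directed adjacent pairs over the n circular edges
  let count : PySem.Dict (String × String) Int :=
    (PySem.List.pyRange 0 (lst.length : Int) 1).foldl (fun d i =>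
      let a := PySem.List.pyGetD lst i ""
      let b := PySem.List.pyGetD lst (PySem.Int.mod (i + 1) (lst.length : Int)) ""
      let d1 := d.insert (a, b) (d.getD (a, b) 0 + 1)
      d1.insert (b, a) (d1.getD (b, a) 0 + 1)) PySem.Dict.empty
  -- stage 2: one guests lookup per distinct pair, weighted by its multiplicity
  count.items.foldl (fun total pc => total + pvWD guests pc.1.1 pc.1.2 * pc.2) 0

-- ===== PRECONDITION & SPEC =====
-- Pre_ excludes exactly the inputs where both Pythons raise KeyError: some seat of the
-- arrangement, or one of its circular neighbors, is missing from the relevant dict.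
def Pre_calc_py (lst : List String) (guests : List (String × List (String × Int))) : Prop :=
  ∀ i < lst.length,
    (pvW guests (lst.getD i "") (lst.getD ((i + lst.length - 1) % lst.length) "")).isSome = true ∧
    (pvW guests (lst.getD i "") (lst.getD ((i + 1) % lst.length) "")).isSome = true

instance (lst : List String) (guests : List (String × List (String × Int))) : Decidable (Pre_calc_py lst guests) := by unfold Pre_calc_py; infer_instance

def pvWitness_calc_py : List String × (List (String × List (String × Int))) :=
  (["a", "b"], [("a", [("b", 3)]), ("b", [("a", -2)])])

def Spec_calc_py (lst : List String) (guests : List (String × List (String × Int))) (out : Int) : Prop := out = calc_py_alt lst guests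
instance (lst : List String) (guests : List (String × List (String × Int))) (out : Int) : Decidable (Spec_calc_py lst guests out) := by unfold Spec_calc_py; infer_instance

-- ===== CLAIM (what is proved, stated in full; the proofs are below) =====
def Claim_equal_calc_py : Prop := ∀ (lst : List String) (guests : List (String × List (String × Int))), Dom_calc_py lst guests → Pre_calc_py lst guests → Spec_calc_py lst guests (calc_py lst guests)

-- ===== LEMMAS AND PROOFS =====

-- the multiset of directed adjacencies B counts: both directions of each circular edge
def pvPairs (lst : List String) : List (String × String) :=
  (List.range lst.length).flatMap (fun k =>
    [(lst.getD k "", lst.getD ((k + 1) % lst.length) ""),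
     (lst.getD ((k + 1) % lst.length) "", lst.getD k "")])

-- (k+1) % n is the inverse of (k+n-1) % n on range n
theorem pv_mod_left_right {n k : ℕ} (hk : k < n) : ((k + 1) % n + n - 1) % n = k := by
  rcases Nat.lt_or_ge (k + 1) n with h | h
  · rw [Nat.mod_eq_of_lt h]
    have : k + 1 + n - 1 = k + n := by omega
    rw [this, Nat.add_mod_right, Nat.mod_eq_of_lt hk]
  · have hkn : k + 1 = n := by omega
    rw [hkn, Nat.mod_self]
    have : 0 + n - 1 = k := by omega
    rw [this, Nat.mod_eq_of_lt hk]

-- the successor map k ↦ (k+1) % n permutes range n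
theorem pv_range_map_succ_perm (n : ℕ) :
    ((List.range n).map (fun k => (k + 1) % n)).Perm (List.range n) := by
  cases n with
  | zero => simp
  | succ m =>
    have hmap : (List.range (m + 1)).map (fun k => (k + 1) % (m + 1))
        = (List.range' 1 m) ++ [0] := by
      rw [List.range_succ, List.map_append]
      congr 1
      · rw [List.range'_eq_map_range]
        apply List.map_congr_left
        intro k hk
        have hk' : k < m := List.mem_range.mp hk
        simp [Nat.mod_eq_of_lt (by omega : k + 1 < m + 1), Nat.add_comm]
      · simp
    rw [hmap]
    have h2 : List.range (m + 1) = 0 :: List.range' 1 m := by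
      rw [List.range_eq_range', List.range'_succ]
    rw [h2]
    exact List.perm_append_singleton 0 (List.range' 1 m)

-- reindexing: sum of left-neighbor terms equals sum of reversed-edge terms
theorem pv_shift_sum (g : ℕ → ℕ → ℤ) (n : ℕ) :
    ((List.range n).map (fun k => g k ((k + n - 1) % n))).sum
      = ((List.range n).map (fun k => g ((k + 1) % n) k)).sum := by
  have hcongr : (List.range n).map (fun k => g ((k + 1) % n) k)
      = ((List.range n).map (fun k => (k + 1) % n)).map (fun j => g j ((j + n - 1) % n)) := by
    rw [List.map_map]
    apply List.map_congr_left
    intro k hk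
    have hk' : k < n := List.mem_range.mp hk
    simp only [Function.comp]
    rw [pv_mod_left_right hk']
  rw [hcongr]
  exact (((pv_range_map_succ_perm n).map (fun j => g j ((j + n - 1) % n))).sum_eq).symm

-- A as an indexed sum over range n
theorem pv_calc_py_eq_sum (lst : List String) (guests : List (String × List (String × Int))) :
    calc_py lst guests
      = ((List.range lst.length).map (fun k =>
          pvWD guests (lst.getD k "") (lst.getD ((k + lst.length - 1) % lst.length) "")
          + pvWD guests (lst.getD k "") (lst.getD ((k + 1) % lst.length) ""))).sum := by
  unfold calc_py
  rw [PySem.List.pyRange_one, List.foldl_map]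
  rw [PySem.List.foldl_congr_mem _ _ (fun res k => res +
        (pvWD guests (lst.getD k "") (lst.getD ((k + lst.length - 1) % lst.length) "")
        + pvWD guests (lst.getD k "") (lst.getD ((k + 1) % lst.length) ""))) 0 ?_]
  · rw [PySem.List.foldl_add, zero_add]
    simp
  · intro acc k hk
    have hk' : k < lst.length := List.mem_range.mp hk
    have hn : 1 ≤ lst.length := by omega
    show acc + _ + _ = _
    have e1 : (0:ℤ) + (k:ℤ) + (lst.length : Int) - 1 = (((k + lst.length - 1 : ℕ)) : ℤ) := by omega
    have e2 : (0:ℤ) + (k:ℤ) + 1 = (((k + 1 : ℕ)) : ℤ) := by omega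
    rw [e1, e2, PySem.Int.mod_natCast, PySem.Int.mod_natCast]
    rw [show ((0:ℤ) + (k:ℤ)) = ((k:ℕ) : ℤ) by omega]
    rw [PySem.List.pyGetD_natCast, PySem.List.pyGetD_natCast, PySem.List.pyGetD_natCast]
    ring

-- A equals the sum of pvWD over the adjacency multiset pvPairs
theorem pv_calc_py_eq_pairs_sum (lst : List String) (guests : List (String × List (String × Int))) :
    calc_py lst guests = ((pvPairs lst).map (fun p => pvWD guests p.1 p.2)).sum := by
  rw [pv_calc_py_eq_sum]
  unfold pvPairs
  rw [List.map_flatMap]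
  have hflat : ∀ (l : List ℕ) (f : ℕ → List ℤ), (l.flatMap f).sum = (l.map fun x => (f x).sum).sum := by
    intro l f
    induction l with
    | nil => simp
    | cons a t ih => simp [List.flatMap_cons, ih]
  rw [hflat]
  rw [PySem.List.sum_map_add_int]
  rw [pv_shift_sum (fun a b => pvWD guests (lst.getD a "") (lst.getD b ""))]
  have : ∀ k, ((([(lst.getD k "", lst.getD ((k + 1) % lst.length) ""),
        (lst.getD ((k + 1) % lst.length) "", lst.getD k "")] : List (String × String)).map
        (fun p => pvWD guests p.1 p.2)).sum)
      = pvWD guests (lst.getD k "") (lst.getD ((k + 1) % lst.length) "")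
        + pvWD guests (lst.getD ((k + 1) % lst.length) "") (lst.getD k "") := by
    intro k; simp
  simp only [this]
  rw [PySem.List.sum_map_add_int]
  ring

-- B's stage-1 fold is exactly the counter of the pvPairs multiset
theorem pv_counter_eq (lst : List String) :
    ((PySem.List.pyRange 0 (lst.length : Int) 1).foldl (fun d i =>
      let a := PySem.List.pyGetD lst i ""
      let b := PySem.List.pyGetD lst (PySem.Int.mod (i + 1) (lst.length : Int)) ""
      let d1 := d.insert (a, b) (d.getD (a, b) 0 + 1)
      d1.insert (b, a) (d1.getD (b, a) 0 + 1)) PySem.Dict.empty)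
    = PySem.Dict.counter (pvPairs lst) := by
  rw [PySem.List.pyRange_one, List.foldl_map]
  rw [PySem.List.foldl_congr_mem _ _ (fun d k =>
        ([(lst.getD k "", lst.getD ((k + 1) % lst.length) ""),
          (lst.getD ((k + 1) % lst.length) "", lst.getD k "")] : List (String × String)).foldl
          (fun d x => d.insert x (d.getD x 0 + 1)) d) PySem.Dict.empty ?_]
  · rw [← List.foldl_flatMap]
    exact PySem.Dict.foldl_insert_getD_add_one_eq_counter _
  · intro d k hk
    have hk' : k < lst.length := List.mem_range.mp hk
    have e2 : (0:ℤ) + (k:ℤ) + 1 = (((k + 1 : ℕ)) : ℤ) := by omega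
    simp only [List.foldl_cons, List.foldl_nil]
    rw [e2, PySem.Int.mod_natCast]
    rw [show ((0:ℤ) + (k:ℤ)) = ((k:ℕ) : ℤ) by omega]
    rw [PySem.List.pyGetD_natCast, PySem.List.pyGetD_natCast]

-- summing an indicator over a duplicate-free list that contains q picks out f q
theorem pv_sum_single (f : (String × String) → ℤ) (D : List (String × String))
    (hD : D.Nodup) (q : String × String) (hq : q ∈ D) :
    (D.map (fun p => if p = q then f p else 0)).sum = f q := by
  induction D with
  | nil => cases hq
  | cons a rest ih =>
    simp only [List.map_cons, List.sum_cons]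
    by_cases ha : a = q
    · subst ha
      rw [if_pos rfl]
      have hz : (rest.map (fun p => if p = a then f p else 0)).sum = 0 := by
        apply List.sum_eq_zero
        intro x hx
        obtain ⟨p, hp, rfl⟩ := List.mem_map.mp hx
        rw [if_neg]
        intro h; subst h
        exact (List.nodup_cons.mp hD).1 hp
      rw [hz, add_zero]
    · rw [if_neg ha, zero_add]
      apply ih (List.nodup_cons.mp hD).2
      rcases List.mem_cons.mp hq with h | h
      · exact absurd h.symm ha
      · exact h

-- multiplicity-weighted sum over any duplicate-free superset of P equals the plain sum over P
theorem pv_dedup_sum (f : (String × String) → ℤ) (P D : List (String × String))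
    (hD : D.Nodup) (hPD : ∀ p ∈ P, p ∈ D) :
    (D.map (fun p => f p * (P.count p : ℤ))).sum = (P.map f).sum := by
  induction P with
  | nil => simp
  | cons q P ih =>
    have hsplit : D.map (fun p => f p * ((q :: P).count p : ℤ))
        = D.map (fun p => f p * (P.count p : ℤ) + (if p = q then f p else 0)) := by
      apply List.map_congr_left
      intro p _
      rw [List.count_cons]
      push_cast
      by_cases h : p = q
      · simp [h]; ring
      · simp [h, Ne.symm h]
    rw [hsplit, PySem.List.sum_map_add_int]
    rw [ih (fun p hp => hPD p (List.mem_cons_of_mem _ hp))]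
    rw [pv_sum_single f D hD q (hPD q List.mem_cons_self)]
    simp [add_comm]

-- B equals the same sum of pvWD over the adjacency multiset pvPairs
theorem pv_calc_py_alt_eq_pairs_sum (lst : List String) (guests : List (String × List (String × Int))) :
    calc_py_alt lst guests = ((pvPairs lst).map (fun p => pvWD guests p.1 p.2)).sum := by
  unfold calc_py_alt
  rw [pv_counter_eq]
  show (List.foldl (fun total pc => total + pvWD guests pc.1.1 pc.1.2 * pc.2) 0
      (PySem.Dict.counter (pvPairs lst)).items) = _
  rw [PySem.Dict.items_counter]
  rw [PySem.List.foldl_add, zero_add, List.map_map]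
  have hcomp : ((fun pc : (String × String) × Int => pvWD guests pc.1.1 pc.1.2 * pc.2) ∘
      (fun k : String × String => (k, ((pvPairs lst).count k : Int))))
      = fun p => pvWD guests p.1 p.2 * ((pvPairs lst).count p : ℤ) := rfl
  rw [hcomp]
  exact pv_dedup_sum (fun p => pvWD guests p.1 p.2) (pvPairs lst)
    (PySem.Set.ofList (pvPairs lst)) (PySem.Set.nodup_ofList _)
    (fun p hp => (PySem.Set.mem_ofList _ _).mpr hp)

-- ===== VERDICT (by name: the statement is the Claim_ definition above) =====
theorem calc_py_spec : Claim_equal_calc_py := by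
  intro lst guests _ _
  unfold Spec_calc_py
  rw [pv_calc_py_eq_pairs_sum, pv_calc_py_alt_eq_pairs_sum]
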